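-- pv_equiv track=rewrite | github.com/romilly/marple | src/marple/glyphs.py | expand_glyphs
-- ===== SOURCE A (Python) =====
-- GLYPH_MAP: dict[str, str] = {
--     # Arithmetic
--     "-": "×",
--     "=": "÷",
--     # Comparison
--     "<": "≤",
--     ">": "≥",
--     "/": "≠",
--     # Structural
--     "r": "⍴",
--     "i": "⍳",
--     "e": "∈",
--     "t": "↑",
--     "y": "↓",
--     "q": "⌽",
--     "Q": "⍉",
--     # Grade
--     "g": "⍋",
--     "G": "⍒",
--     # Logic
--     "^": "∧",
--     "v": "∨",
--     "~": "⍲",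
--     "T": "⍱",
--     # Math
--     "*": "⍟",
--     "o": "○",
--     "!": "⌈",
--     "d": "⌊",
--     "D": "⌹",
--     "p": "⌈",
--     "b": "⌊",
--     # Encode/decode
--     "n": "⊤",
--     "N": "⊥",
--     # I/O and special
--     "w": "⍵",
--     "a": "⍺",
--     "V": "∇",
--     "l": "←",
--     "x": "⋄",
--     "z": "⍎",
--     "Z": "⍕",
--     # Jot, compose, rank, from
--     "j": "∘",
--     "J": "⍤",
--     "I": "⌷",
--     # High minus
--     "2": "¯",
--     # Comment
--     "c": "⍝",
--     # Braces (convenience)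
--     "[": "{",
--     "]": "}",
-- }
--
-- def expand_glyphs(line: str) -> str:
--     """Replace backtick sequences with APL glyphs.
--
--     `x → APL glyph, `` → literal backtick.
--     """
--     result: list[str] = []
--     i = 0
--     while i < len(line):
--         if line[i] == "`" and i + 1 < len(line):
--             next_ch = line[i + 1]
--             if next_ch == "`":
--                 result.append("`")
--                 i += 2
--             elif next_ch in GLYPH_MAP:
--                 result.append(GLYPH_MAP[next_ch])
--                 i += 2
--             else:
--                 result.append("`")
--                 i += 1
--         else:
--             result.append(line[i])
--             i += 1
--     return "".join(result)
-- ===== SOURCE B (Python) =====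
-- GLYPH_KEYS = "-=<>/rietyqQgG^v~T*o!dDpbnNwaVlxzZjJI2c[]"
-- GLYPH_VALS = ["×", "÷", "≤", "≥", "≠", "⍴", "⍳", "∈", "↑", "↓", "⌽", "⍉",
--               "⍋", "⍒", "∧", "∨", "⍲", "⍱", "⍟", "○", "⌈", "⌊", "⌹", "⌈",
--               "⌊", "⊤", "⊥", "⍵", "⍺", "∇", "←", "⋄", "⍎", "⍕", "∘", "⍤",
--               "⌷", "¯", "⍝", "{", "}"]
--
-- def expand_glyphs(line: str) -> str:
--     """Replace backtick escapes with APL glyphs: split on "`" once, then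
--     emit the first segment verbatim and decode each later segment's head."""
--     parts = line.split("`")
--     out = [parts[0]]
--     segs = parts[1:]
--     k = 0
--     while k < len(segs):
--         seg = segs[k]
--         if seg == "":
--             if k + 1 < len(segs):
--                 out.append("`" + segs[k + 1])   # "``" -> literal backtick
--                 k += 2
--             else:
--                 out.append("`")                 # lone trailing backtick
--                 k += 1
--         else:
--             c = seg[0]
--             if c in GLYPH_KEYS:
--                 out.append(GLYPH_VALS[GLYPH_KEYS.index(c)] + seg[1:])
--             else:
--                 out.append("`" + seg)           # unknown escape kept
--             k += 1
--     return "".join(out)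
-- ===== Notes on version B (the rewrite author's own statement) =====
-- stated objective: faster
-- what changed: Replaced A's char-by-char while loop with index arithmetic and line[i+1] lookahead by a staged pass: split the line on backtick once, emit the first segment verbatim, and decode only the head character of each later segment (empty segment = escaped backtick), looking glyphs up positionally in a key string instead of a dict.
import Mathlib
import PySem

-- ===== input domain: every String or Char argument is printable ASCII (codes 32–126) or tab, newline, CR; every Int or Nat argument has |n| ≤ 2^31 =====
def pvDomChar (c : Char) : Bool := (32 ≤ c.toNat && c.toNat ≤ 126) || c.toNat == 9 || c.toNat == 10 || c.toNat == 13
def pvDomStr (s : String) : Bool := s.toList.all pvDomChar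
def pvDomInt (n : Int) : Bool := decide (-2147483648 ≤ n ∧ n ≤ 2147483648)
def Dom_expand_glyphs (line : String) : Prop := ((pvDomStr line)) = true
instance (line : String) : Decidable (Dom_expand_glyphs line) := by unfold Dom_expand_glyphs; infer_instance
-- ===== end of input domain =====

set_option maxRecDepth 8192

-- B replaces A's char-by-char while loop (index arithmetic, lookahead at line[i+1]) by a staged
-- pass: split the line on "`" once, then decode only the head character of each later segment
-- (objective: alternative decomposition; same O(n), measured faster by a constant factor:
-- the backtick-free runs are handled by str.split/join at C speed instead of per-char Python steps).

-- ===== PORT A =====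
-- GLYPH_MAP: Python's dict with 1-char string keys, keyed here by the character.
def glyphMap : PySem.Dict Char String := PySem.Dict.ofList [
  ('-', "×"), ('=', "÷"),
  ('<', "≤"), ('>', "≥"), ('/', "≠"),
  ('r', "⍴"), ('i', "⍳"), ('e', "∈"), ('t', "↑"), ('y', "↓"), ('q', "⌽"), ('Q', "⍉"),
  ('g', "⍋"), ('G', "⍒"),
  ('^', "∧"), ('v', "∨"), ('~', "⍲"), ('T', "⍱"),
  ('*', "⍟"), ('o', "○"), ('!', "⌈"), ('d', "⌊"), ('D', "⌹"), ('p', "⌈"), ('b', "⌊"),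
  ('n', "⊤"), ('N', "⊥"),
  ('w', "⍵"), ('a', "⍺"), ('V', "∇"), ('l', "←"), ('x', "⋄"), ('z', "⍎"), ('Z', "⍕"),
  ('j', "∘"), ('J', "⍤"), ('I', "⌷"),
  ('2', "¯"),
  ('c', "⍝"),
  ('[', "{"), (']', "}")]

-- A's while loop over `i`, written as recursion on the suffix line[i:]; each branch mirrors
-- A's branch (consume 2 chars for "``"/known glyph, 1 char otherwise), building `result`.
def expandLoopA : List Char → List String
  | [] => []
  | c :: rest =>
    if c = '`' then
      match rest with
      | c2 :: rest2 =>
        if c2 = '`' then "`" :: expandLoopA rest2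
        else
          match glyphMap.get? c2 with
          | some g => g :: expandLoopA rest2
          | none => "`" :: expandLoopA (c2 :: rest2)
      | [] => String.singleton c :: expandLoopA []   -- i + 1 < len(line) fails → final else branch
    else String.singleton c :: expandLoopA rest

def expand_glyphs (line : String) : String := PySem.Str.join "" (expandLoopA line.toList)

-- ===== PORT B =====
-- Source B's GLYPH_KEYS string (as its character list) and GLYPH_VALS list.
def glyphKeys : List Char := ['-', '=', '<', '>', '/', 'r', 'i', 'e', 't', 'y', 'q', 'Q',
  'g', 'G', '^', 'v', '~', 'T', '*', 'o', '!', 'd', 'D', 'p', 'b', 'n', 'N',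
  'w', 'a', 'V', 'l', 'x', 'z', 'Z', 'j', 'J', 'I', '2', 'c', '[', ']']
def glyphVals : List (List Char) := ["×".toList, "÷".toList, "≤".toList, "≥".toList, "≠".toList,
  "⍴".toList, "⍳".toList, "∈".toList, "↑".toList, "↓".toList, "⌽".toList, "⍉".toList,
  "⍋".toList, "⍒".toList, "∧".toList, "∨".toList, "⍲".toList, "⍱".toList,
  "⍟".toList, "○".toList, "⌈".toList, "⌊".toList, "⌹".toList, "⌈".toList, "⌊".toList,
  "⊤".toList, "⊥".toList, "⍵".toList, "⍺".toList, "∇".toList, "←".toList, "⋄".toList,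
  "⍎".toList, "⍕".toList, "∘".toList, "⍤".toList, "⌷".toList, "¯".toList, "⍝".toList,
  "{".toList, "}".toList]

-- Source B's while loop over segs (parts[1:]): each step emits one piece of `out` and advances
-- k by 1 or 2; GLYPH_KEYS.index(c) is ported as List.idxOf (exact under the `c in GLYPH_KEYS` guard).
def decodeSegsB : List (List Char) → List (List Char)
  | [] => []
  | [] :: rest =>
    (match rest with
     | next :: rest' => ('`' :: next) :: decodeSegsB rest'      -- "``": literal backtick, k += 2
     | [] => [['`']])                                           -- lone trailing backtick
  | (c :: cs) :: rest =>
    (if glyphKeys.contains c then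
       PySem.List.pyGetD glyphVals ((glyphKeys.idxOf c : Nat) : Int) [] ++ cs
     else '`' :: c :: cs) :: decodeSegsB rest                   -- unknown escape kept

def expand_glyphs_alt (line : String) : String :=
  match PySem.Chars.splitOn line.toList ['`'] with
  | [] => ""                                                    -- unreachable: split is never empty
  | p0 :: segs => String.ofList (PySem.Chars.join [] (p0 :: decodeSegsB segs))

-- ===== PRECONDITION & SPEC =====
def Spec_expand_glyphs (line : String) (out : String) : Prop := out = expand_glyphs_alt line
instance (line : String) (out : String) : Decidable (Spec_expand_glyphs line out) := by unfold Spec_expand_glyphs; infer_instance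

-- ===== CLAIM (what is proved, stated in full; the proofs are below) =====
def Claim_equal_expand_glyphs : Prop := ∀ (line : String), Dom_expand_glyphs line → Spec_expand_glyphs line (expand_glyphs line)

-- ===== LEMMAS AND PROOFS =====

-- The two glyph tables agree: dict lookup = guarded positional lookup.
theorem look_eq (c : Char) :
    glyphMap.get? c =
      if glyphKeys.contains c then
        some (String.ofList (PySem.List.pyGetD glyphVals ((glyphKeys.idxOf c : Nat) : Int) []))
      else none := by
  by_cases h : glyphKeys.contains c
  · rw [if_pos h]
    have h' : c ∈ glyphKeys := by simpa using h
    fin_cases h' <;> decide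
  · rw [if_neg h]
    simp only [PySem.Dict.get?]
    rw [List.find?_eq_none.mpr, Option.map_none]
    intro p hp
    have hk : p.1 ∈ glyphKeys := by
      have := List.mem_map_of_mem (f := Prod.fst) hp
      rwa [show glyphMap.items.map Prod.fst = glyphKeys from rfl] at this
    simp only [beq_iff_eq]
    intro hc; subst hc
    exact absurd (by simpa using hk) (by simpa using h)

-- The flattened character output of A's loop.
def joinA (l : List Char) : List Char := ((expandLoopA l).map String.toList).flatten

theorem joinA_cons_of_ne (c : Char) (l : List Char) (h : c ≠ '`') :
    joinA (c :: l) = c :: joinA l := by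
  unfold joinA; rw [expandLoopA.eq_def]; simp [h, String.singleton]

theorem joinA_prefix (h t : List Char) (hh : ∀ c ∈ h, c ≠ '`') :
    joinA (h ++ t) = h ++ joinA t := by
  induction h with
  | nil => rfl
  | cons c h ih =>
      rw [List.cons_append, joinA_cons_of_ne c _ (hh c (.head _)),
        ih (fun c hc => hh c (.tail _ hc))]
      simp

theorem joinA_tick : joinA ['`'] = ['`'] := by decide

theorem joinA_of_all_ne (l : List Char) (h : ∀ c ∈ l, c ≠ '`') : joinA l = l := by
  induction l with
  | nil => rfl
  | cons c t ih =>
      rw [joinA_cons_of_ne c t (h c (.head _)), ih (fun c hc => h c (.tail _ hc))]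

theorem joinA_tick_tick (l : List Char) : joinA ('`' :: '`' :: l) = '`' :: joinA l := by
  unfold joinA; rw [expandLoopA.eq_def]; simp

theorem joinA_glyph (c : Char) (g : String) (l : List Char) (hc : c ≠ '`')
    (hg : glyphMap.get? c = some g) :
    joinA ('`' :: c :: l) = g.toList ++ joinA l := by
  unfold joinA; rw [expandLoopA.eq_def]; simp [hc, hg]

theorem joinA_unknown (c : Char) (l : List Char) (hc : c ≠ '`')
    (hg : glyphMap.get? c = none) :
    joinA ('`' :: c :: l) = '`' :: c :: joinA l := by
  unfold joinA
  rw [expandLoopA.eq_def]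
  simp only [hc, hg, if_pos]
  have := joinA_cons_of_ne c l hc
  unfold joinA at this
  simp_all

-- Fuel-free characterisation of splitting on '`': head segment + recursion past the tick.
def splitSpec (l : List Char) : List (List Char) :=
    let h := l.takeWhile (· ≠ '`')
    match hm : l.dropWhile (· ≠ '`') with
    | [] => [h]
    | _ :: t => h :: splitSpec t
  termination_by l.length
  decreasing_by
    have hle := List.length_dropWhile_le (fun c : Char => decide (c ≠ '`')) l
    rw [hm] at hle
    simp only [List.length_cons] at hle ⊢
    omega

def prependFirst (p : List Char) : List (List Char) → List (List Char)
  | [] => [p]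
  | x :: xs => (p ++ x) :: xs

theorem splitSpec_nil : splitSpec [] = [[]] := by rw [splitSpec]; rfl

theorem splitSpec_ne_nil (l : List Char) : splitSpec l ≠ [] := by
  rw [splitSpec]; split <;> simp

theorem splitSpec_cons_tick (l : List Char) : splitSpec ('`' :: l) = [] :: splitSpec l := by
  rw [splitSpec]
  split
  case _ heq => simp at heq
  case _ heq =>
      simp at heq
      obtain ⟨h1, h2⟩ := heq
      subst h1; subst h2
      simp

theorem splitSpec_cons_ne (c : Char) (l : List Char) (hc : c ≠ '`') :
    splitSpec (c :: l) = prependFirst [c] (splitSpec l) := by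
  rw [splitSpec, splitSpec]
  have hd : List.dropWhile (fun x => decide ¬x = '`') (c :: l)
      = List.dropWhile (fun x => decide ¬x = '`') l := by
    simp [hc]
  have ht : List.takeWhile (fun x => decide (x ≠ '`')) (c :: l)
      = c :: List.takeWhile (fun x => decide (x ≠ '`')) l := by
    simp [hc]
  split
  case _ heq =>
    rw [hd] at heq
    rw [heq, ht]
    simp [prependFirst]
  case _ heq =>
    rw [hd] at heq
    rw [heq, ht]
    simp [prependFirst]

theorem prependFirst_assoc (p q : List Char) (s : List (List Char)) :
    prependFirst p (prependFirst q s) = prependFirst (p ++ q) s := by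
  cases s <;> simp [prependFirst]

-- the PySem split (fuel-based go loop) computes splitSpec
theorem go_eq_spec (fuel : Nat) (l cur : List Char) (acc : List (List Char))
    (hf : l.length ≤ fuel) :
    PySem.Chars.splitOn.go ['`'] fuel l cur acc =
      acc.reverse ++ prependFirst cur.reverse (splitSpec l) := by
  induction fuel generalizing l cur acc with
  | zero =>
      have : l = [] := by cases l <;> simp_all
      subst this
      rw [PySem.Chars.splitOn.go, splitSpec]
      simp [prependFirst]
  | succ fuel ih =>
      cases l with
      | nil =>
          rw [PySem.Chars.splitOn.go, splitSpec]
          simp [prependFirst]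
          omega
      | cons c rest =>
          by_cases hc : c = '`'
          · subst hc
            rw [PySem.Chars.splitOn.go]
            have hpre : List.isPrefixOf ['`'] ('`' :: rest) = true := by simp [List.isPrefixOf]
            simp only [hpre, if_true, List.length_singleton, List.drop_one, List.tail_cons]
            rw [ih rest [] _ (by simpa using Nat.le_of_succ_le_succ (by simpa using hf)),
              splitSpec_cons_tick]
            cases hr : splitSpec rest with
            | nil => exact absurd hr (splitSpec_ne_nil rest)
            | cons a s => simp [prependFirst]
          · rw [PySem.Chars.splitOn.go]
            have hpre : List.isPrefixOf ['`'] (c :: rest) = false := by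
              simp [List.isPrefixOf]
              intro h; exact absurd h.symm hc
            simp only [hpre, Bool.false_eq_true, if_false]
            rw [ih rest (c :: cur) acc (by simpa using Nat.le_of_succ_le_succ (by simpa using hf)),
              splitSpec_cons_ne c rest hc, prependFirst_assoc]
            simp

theorem splitOn_eq_spec (l : List Char) : PySem.Chars.splitOn l ['`'] = splitSpec l := by
  rw [PySem.Chars.splitOn, go_eq_spec (l.length + 1) l [] [] (by omega)]
  cases hs : splitSpec l with
  | nil => rw [splitSpec] at hs; split at hs <;> simp_all
  | cons a s => simp [prependFirst]

-- every char of the backtick-free prefix satisfies ≠ '`'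
theorem takeWhile_ne_tick (l : List Char) :
    ∀ c ∈ l.takeWhile (fun c => decide (c ≠ '`')), c ≠ '`' := by
  intro c hc
  simpa using List.mem_takeWhile_imp hc

-- the head of the dropWhile suffix is a backtick
theorem dropWhile_head_tick (l : List Char) (b : Char) (t : List Char)
    (hm : l.dropWhile (fun c => decide (c ≠ '`')) = b :: t) : b = '`' := by
  have hne : l.dropWhile (fun c => decide (c ≠ '`')) ≠ [] := by rw [hm]; simp
  have h2 := List.head_dropWhile_not (fun c : Char => decide (c ≠ '`')) hne
  simp only [hm, List.head_cons] at h2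
  simpa using h2

-- main invariant: the split head plus B's decoding of the remaining segments is A's output
theorem main_eq_aux (n : Nat) : ∀ (l : List Char), l.length ≤ n → ∀ (p0 : List Char)
    (segs : List (List Char)), splitSpec l = p0 :: segs →
    p0 ++ (decodeSegsB segs).flatten = joinA l := by
  induction n with
  | zero =>
      intro l hl p0 segs hs
      have : l = [] := by cases l <;> simp_all
      subst this
      rw [splitSpec] at hs
      simp at hs
      obtain ⟨h1, h2⟩ := hs
      subst h1; subst h2
      rfl
  | succ n ih =>
      intro l hl p0 segs hs
      rw [splitSpec] at hs
      split at hs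
      case _ hd =>
        simp only [List.cons.injEq] at hs
        obtain ⟨h1, h2⟩ := hs
        subst h1; subst h2
        have hl2 : l = l.takeWhile (fun c => decide (c ≠ '`')) := by
          conv_lhs => rw [← List.takeWhile_append_dropWhile (p := fun c => decide (c ≠ '`')) (l := l), hd]
          simp
        rw [show decodeSegsB [] = [] from rfl]
        simp only [List.flatten_nil, List.append_nil]
        conv_rhs => rw [hl2]
        rw [joinA_of_all_ne _ (takeWhile_ne_tick l)]
      case _ b t hd =>
        have hb := dropWhile_head_tick l b t hd
        subst hb
        simp only [List.cons.injEq] at hs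
        obtain ⟨h1, h2⟩ := hs
        subst h1; subst h2
        have hlt : t.length ≤ n := by
          have := List.length_dropWhile_le (fun c : Char => decide (c ≠ '`')) l
          rw [hd] at this
          simp only [List.length_cons] at this
          omega
        have key : (decodeSegsB (splitSpec t)).flatten = joinA ('`' :: t) := by
          cases t with
          | nil =>
              rw [splitSpec_nil, joinA_tick]
              rfl
          | cons c t2 =>
              have hlt2 : t2.length ≤ n := by simp at hlt; omega
              by_cases hc : c = '`'
              · subst hc
                rw [splitSpec_cons_tick, joinA_tick_tick]
                cases hr : splitSpec t2 with
                | nil => exact absurd hr (splitSpec_ne_nil t2)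
                | cons r0 rs =>
                    have hIH := ih t2 hlt2 r0 rs hr
                    rw [show decodeSegsB ([] :: r0 :: rs) = ('`' :: r0) :: decodeSegsB rs from rfl]
                    simp only [List.flatten_cons, List.cons_append]
                    rw [hIH]
              · rw [splitSpec_cons_ne c t2 hc]
                cases hr : splitSpec t2 with
                | nil => exact absurd hr (splitSpec_ne_nil t2)
                | cons r0 rs =>
                    have hIH := ih (c :: t2) (by simpa using hlt) (c :: r0) rs
                      (by rw [splitSpec_cons_ne c t2 hc, hr]; rfl)
                    rw [joinA_cons_of_ne c t2 hc] at hIH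
                    simp only [List.cons_append, List.cons.injEq] at hIH
                    -- hIH : c = c ∧ r0 ++ … = joinA t2  (after cons injection)
                    have hIH2 : r0 ++ (decodeSegsB rs).flatten = joinA t2 := hIH.2
                    simp only [prependFirst, List.singleton_append]
                    by_cases hk : glyphKeys.contains c
                    · have hg : glyphMap.get? c = some (String.ofList
                          (PySem.List.pyGetD glyphVals ((glyphKeys.idxOf c : Nat) : Int) [])) := by
                        rw [look_eq, if_pos hk]
                      rw [joinA_glyph c _ t2 hc hg, String.toList_ofList]
                      rw [show decodeSegsB ((c :: r0) :: rs)
                          = (if glyphKeys.contains c then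
                               PySem.List.pyGetD glyphVals ((glyphKeys.idxOf c : Nat) : Int) [] ++ r0
                             else '`' :: c :: r0) :: decodeSegsB rs from rfl, if_pos hk]
                      simp only [List.flatten_cons, List.append_assoc]
                      rw [hIH2]
                    · have hg : glyphMap.get? c = none := by rw [look_eq, if_neg hk]
                      rw [joinA_unknown c t2 hc hg]
                      rw [show decodeSegsB ((c :: r0) :: rs)
                          = (if glyphKeys.contains c then
                               PySem.List.pyGetD glyphVals ((glyphKeys.idxOf c : Nat) : Int) [] ++ r0
                             else '`' :: c :: r0) :: decodeSegsB rs from rfl, if_neg hk]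
                      simp only [List.flatten_cons, List.cons_append]
                      rw [hIH2]
        conv_rhs => rw [← List.takeWhile_append_dropWhile (p := fun c => decide (c ≠ '`')) (l := l), hd]
        rw [joinA_prefix _ _ (takeWhile_ne_tick l), key]

theorem main_eq (l : List Char) :
    (match splitSpec l with
     | [] => []
     | p0 :: segs => p0 ++ (decodeSegsB segs).flatten) = joinA l := by
  cases hs : splitSpec l with
  | nil => exact absurd hs (splitSpec_ne_nil l)
  | cons p0 segs =>
      simp only []
      exact main_eq_aux l.length l (le_refl _) p0 segs hs

-- "".join(result) flattens the pieces
theorem join_empty_sep (ls : List (List Char)) : PySem.Chars.join [] ls = ls.flatten := by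
  induction ls with
  | nil => rfl
  | cons a t ih => cases t <;> simp_all [PySem.Chars.join, List.intercalate, List.intersperse]

-- ===== VERDICT (by name: the statement is the Claim_ definition above) =====
theorem expand_glyphs_spec : Claim_equal_expand_glyphs := by
  intro line _
  unfold Spec_expand_glyphs expand_glyphs expand_glyphs_alt
  rw [splitOn_eq_spec]
  cases hs : splitSpec line.toList with
  | nil => exact absurd hs (splitSpec_ne_nil _)
  | cons p0 segs =>
      simp only []
      apply String.toList_inj.mp
      rw [String.toList_ofList, join_empty_sep]
      have := main_eq line.toList
      rw [hs] at this
      simp only [] at this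
      rw [List.flatten_cons, this]
      simp [pysem, join_empty_sep, joinA]
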